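-- pv_equiv track=rewrite | github.com/dmi3eva/shishipun | shishiweb/chat/problem_solving.py | repair_empty_prediction
-- ===== SOURCE A (Python) =====
-- def repair_empty_prediction(prediction, parameters_number):
--     values = dict()
--     z = [] # номера чисел, у которых ноль
--     n = [] # нераставленные метки
--     for i in range(len(prediction)):
--         v = prediction[i]
--         values[v] = 1
--         if (v == 0):
--             z.append(i)
--     for i in range(1, parameters_number + 1):
--         if (i not in values.keys()):
--             n.append(i)
--     for i in range(min(len(z), len(n))):
--         prediction[z[i]] = n[i]
--     return prediction
-- ===== SOURCE B (Python) =====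
-- def repair_empty_prediction(prediction, parameters_number):
--     # presence bitmap over the label space + an advancing "next free label" pointer:
--     # no missing-label list and no zero-index list are ever built.
--     seen = [False] * (parameters_number + 2)
--     for v in prediction:
--         if 0 <= v <= parameters_number:
--             seen[v] = True
--     label = 1
--     for idx, v in enumerate(prediction):
--         if v == 0:
--             while label <= parameters_number and seen[label]:
--                 label += 1
--             if label > parameters_number:
--                 break
--             prediction[idx] = label
--             label += 1
--     return prediction
-- ===== Notes on version B (the rewrite author's own statement) =====
-- stated objective: alternative
-- what changed: A builds a dict of seen values, a list of zero indices and a list of missing labels, then joins the zero-index list and missing list positionally up to the shorter length; B builds no intermediate lists at all: it marks present values in a boolean bitmap over the label space and makes one pass over the prediction, advancing a next-free-label pointer past marked labels and writing it at each zero until the label space is exhausted.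
import Mathlib
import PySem

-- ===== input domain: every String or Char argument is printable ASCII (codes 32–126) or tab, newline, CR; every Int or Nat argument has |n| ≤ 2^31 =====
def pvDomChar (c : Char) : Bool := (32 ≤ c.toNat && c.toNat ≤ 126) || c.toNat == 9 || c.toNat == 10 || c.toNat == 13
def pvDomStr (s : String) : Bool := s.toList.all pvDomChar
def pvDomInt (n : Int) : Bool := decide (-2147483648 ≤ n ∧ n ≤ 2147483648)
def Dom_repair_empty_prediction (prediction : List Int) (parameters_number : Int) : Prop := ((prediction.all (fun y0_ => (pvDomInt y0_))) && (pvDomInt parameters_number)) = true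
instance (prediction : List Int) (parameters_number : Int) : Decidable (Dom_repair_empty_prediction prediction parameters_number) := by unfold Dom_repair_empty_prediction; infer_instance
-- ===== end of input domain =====

-- B replaces A's three-pass bookkeeping (dict of seen values + zero-index list + missing-label list
-- joined by min-length index loop) by a presence bitmap over the label space and a single pass that
-- advances a "next free label" pointer — no intermediate lists at all (alternative decomposition, same asymptotic cost; both Pythons mutate `prediction` in place the same way; the theorem is about the return value).


-- ===== PORT A =====
def repair_empty_prediction (prediction : List Int) (parameters_number : Int) : List Int :=
  -- values = dict(); z = []; for i in range(len(prediction)): v = prediction[i]; values[v] = 1; if v == 0: z.append(i)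
  -- (the index i is always in range, so prediction[i] is ported as getD with an unreachable default)
  let st := (List.range prediction.length).foldl
    (fun (st : PySem.Dict Int Int × List Int) i =>
      (st.1.insert (prediction.getD i 0) 1,
       if prediction.getD i 0 = 0 then st.2 ++ [(i : Int)] else st.2))
    (PySem.Dict.empty, [])
  let values := st.1
  let z := st.2
  -- n = []; for i in range(1, parameters_number + 1): if i not in values.keys(): n.append(i)
  -- (append modelled by consing and one final reverse — the same list, without quadratic ++ cost)
  let n := ((PySem.List.pyRange 1 (parameters_number + 1) 1).foldl
    (fun n i => if !(values.contains i) then i :: n else n) []).reverse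
  -- for i in range(min(len(z), len(n))): prediction[z[i]] = n[i]  (indices always in range)
  (List.range (min z.length n.length)).foldl
    (fun pred i => PySem.List.pySetD pred (z.getD i 0) (n.getD i 0)) prediction

-- ===== PORT B =====
-- seen = [False] * (parameters_number + 2); for v in prediction: if 0 <= v <= parameters_number: seen[v] = True
def buildSeen (prediction : List Int) (m : Int) : List Bool :=
  prediction.foldl
    (fun seen v => if 0 ≤ v ∧ v ≤ m then seen.set v.toNat true else seen)
    (List.replicate (m + 2).toNat false)

-- while label <= parameters_number and seen[label]: label += 1
-- (seen[label] is only read when 1 <= label <= parameters_number, always in range, so getD is exact)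
def advanceLabel (seen : List Bool) (m : Int) (label : Int) : Int :=
  if h : label ≤ m ∧ seen.getD label.toNat false = true then
    advanceLabel seen m (label + 1)
  else label
termination_by (m + 1 - label).toNat
decreasing_by omega

-- for idx, v in enumerate(prediction): if v == 0: <while>; if label > m: break; prediction[idx] = label; label += 1
def fillLoop (seen : List Bool) (m : Int) : List Int → Int → List Int
  | [], _ => []
  | v :: rest, label =>
    if v = 0 then
      let label' := advanceLabel seen m label
      if m < label' then v :: rest
      else label' :: fillLoop seen m rest (label' + 1)
    else v :: fillLoop seen m rest label

def repair_empty_prediction_alt (prediction : List Int) (parameters_number : Int) : List Int :=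
  fillLoop (buildSeen prediction parameters_number) parameters_number prediction 1

-- ===== PRECONDITION & SPEC =====
def Spec_repair_empty_prediction (prediction : List Int) (parameters_number : Int) (out : List Int) : Prop := out = repair_empty_prediction_alt prediction parameters_number
instance (prediction : List Int) (parameters_number : Int) (out : List Int) : Decidable (Spec_repair_empty_prediction prediction parameters_number out) := by unfold Spec_repair_empty_prediction; infer_instance

-- ===== CLAIM (what is proved, stated in full; the proofs are below) =====
def Claim_equal_repair_empty_prediction : Prop := ∀ (prediction : List Int) (parameters_number : Int), Dom_repair_empty_prediction prediction parameters_number → Spec_repair_empty_prediction prediction parameters_number (repair_empty_prediction prediction parameters_number)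

-- ===== LEMMAS AND PROOFS =====

-- proof-side model: write the k-th missing label at the k-th zero, stopping when labels run out
def fillZeros : List Int → List Int → List Int
  | xs, [] => xs
  | [], _ :: _ => []
  | x :: xs, m :: ms => if x = 0 then m :: fillZeros xs ms else x :: fillZeros xs (m :: ms)

-- spec of the dict built by A's first loop
def dictOf (xs : List Int) : PySem.Dict Int Int :=
  xs.foldl (fun d v => d.insert v 1) PySem.Dict.empty

-- spec of A's z list: the (0-based, in-range) indices of the zeros of xs
def zsp : List Int → List Int
  | [] => []
  | x :: xs => (if x = 0 then [(0 : Int)] else []) ++ (zsp xs).map (· + 1)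

-- the labels ≥ label that are not marked in seen
def missS (seen : List Bool) (m label : Int) : List Int :=
  (PySem.List.pyRange label (m + 1) 1).filter (fun i => !(seen.getD i.toNat false))

theorem zsp_nonneg (xs : List Int) : ∀ i ∈ zsp xs, 0 ≤ i := by
  induction xs with
  | nil => simp [zsp]
  | cons x xs ih =>
    intro i hi
    simp only [zsp, List.mem_append, List.mem_map] at hi
    rcases hi with hi | ⟨j, hj, rfl⟩
    · split at hi <;> simp_all
    · have := ih j hj; omega

theorem zsp_append_singleton (xs : List Int) (x : Int) :
    zsp (xs ++ [x]) = zsp xs ++ (if x = 0 then [(xs.length : Int)] else []) := by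
  induction xs with
  | nil => simp [zsp]
  | cons y ys ih =>
    simp only [List.cons_append, zsp, ih, List.map_append]
    split <;> simp <;> split <;> simp

-- consing-then-reverse accumulation of a conditional append loop is a filter
theorem foldl_cons_if (p : Int → Bool) (l : List Int) :
    ∀ (acc : List Int),
    l.foldl (fun acc x => if p x then x :: acc else acc) acc = (l.filter p).reverse ++ acc := by
  induction l with
  | nil => simp
  | cons x l ih =>
    intro acc
    simp only [List.foldl_cons, ih, List.filter_cons]
    split <;> simp

theorem contains_foldl_insert (xs : List Int) (d : PySem.Dict Int Int) (k : Int) :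
    (xs.foldl (fun d v => d.insert v 1) d).contains k = (d.contains k || xs.contains k) := by
  induction xs generalizing d with
  | nil => simp
  | cons x xs ih =>
    simp [List.foldl_cons, ih, PySem.Dict.contains_insert]
    by_cases h : k = x
    · simp [h]
    · rw [show (k == x) = false from beq_eq_false_iff_ne.mpr h]
      simp [h]

-- A's first loop builds exactly (dictOf xs, zsp xs)
theorem loop1_spec (xs : List Int) :
    (List.range xs.length).foldl
      (fun (st : PySem.Dict Int Int × List Int) i =>
        (st.1.insert (xs.getD i 0) 1,
         if xs.getD i 0 = 0 then st.2 ++ [(i : Int)] else st.2))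
      (PySem.Dict.empty, [])
    = (dictOf xs, zsp xs) := by
  induction xs using List.reverseRecOn with
  | nil => simp [dictOf, zsp]
  | append_singleton ys x ih =>
    rw [List.length_append, List.length_cons, List.length_nil, List.range_succ,
        List.foldl_append]
    have hcong := PySem.List.foldl_congr_mem (List.range ys.length)
      (fun (st : PySem.Dict Int Int × List Int) i =>
        ((ys ++ [x]).getD i 0 |> fun v => (st.1.insert v 1,
         if v = 0 then st.2 ++ [(i : Int)] else st.2)))
      (fun (st : PySem.Dict Int Int × List Int) i =>
        (st.1.insert (ys.getD i 0) 1,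
         if ys.getD i 0 = 0 then st.2 ++ [(i : Int)] else st.2))
      (PySem.Dict.empty, [])
      (by intro acc i hi
          have hlt : i < ys.length := List.mem_range.mp hi
          simp [List.getElem?_append_left hlt])
    simp only [hcong, ih, List.foldl_cons, List.foldl_nil]
    have hget : (ys ++ [x]).getD ys.length 0 = x := by
      simp [List.getD_eq_getElem?_getD]
    rw [hget, zsp_append_singleton]
    unfold dictOf
    rw [List.foldl_append]
    simp only [List.foldl_cons, List.foldl_nil]
    split <;> simp

-- A's third loop (index join up to min length) is the fold over the zip
theorem setloop_eq_zip (z : List Int) :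
    ∀ (n p : List Int),
    (List.range (min z.length n.length)).foldl
      (fun pred i => PySem.List.pySetD pred (z.getD i 0) (n.getD i 0)) p
    = (z.zip n).foldl (fun pred im => PySem.List.pySetD pred im.1 im.2) p := by
  induction z with
  | nil => simp
  | cons zi z ih =>
    intro n p
    cases n with
    | nil => simp
    | cons m n =>
      simp only [List.length_cons, Nat.succ_min_succ, List.range_succ_eq_map,
        List.foldl_cons, List.foldl_map, List.getD_cons_zero, List.zip_cons_cons]
      have : ∀ (q : List Int),
          (List.range (min z.length n.length)).foldl
            (fun pred i => PySem.List.pySetD pred ((zi :: z).getD i.succ 0) ((m :: n).getD i.succ 0)) q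
          = (List.range (min z.length n.length)).foldl
            (fun pred i => PySem.List.pySetD pred (z.getD i 0) (n.getD i 0)) q := by
        intro q
        apply PySem.List.foldl_congr_mem
        intro acc i _
        simp
      rw [this, ih]

-- setting at indices all shifted by one leaves the head alone
theorem fold_shift (ps : List (Int × Int)) :
    ∀ (y : Int) (ys : List Int), (∀ p ∈ ps, 0 ≤ p.1) →
    (ps.map (fun p => (p.1 + 1, p.2))).foldl
      (fun pred im => PySem.List.pySetD pred im.1 im.2) (y :: ys)
    = y :: ps.foldl (fun pred im => PySem.List.pySetD pred im.1 im.2) ys := by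
  induction ps with
  | nil => simp
  | cons p ps ih =>
    intro y ys h
    have h0 : 0 ≤ p.1 := h p (by simp)
    simp only [List.map_cons, List.foldl_cons]
    rw [PySem.List.pySetD_of_nonneg _ _ (by omega),
        PySem.List.pySetD_of_nonneg _ _ h0]
    have : (p.1 + 1).toNat = p.1.toNat + 1 := by omega
    rw [this, List.set_cons_succ]
    exact ih y (ys.set p.1.toNat p.2) (fun q hq => h q (by simp [hq]))

-- writing the labels at the zero positions is fillZeros
theorem zipfold_eq_fill (xs : List Int) :
    ∀ (n : List Int),
    ((zsp xs).zip n).foldl (fun pred im => PySem.List.pySetD pred im.1 im.2) xs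
    = fillZeros xs n := by
  induction xs with
  | nil => intro n; cases n <;> simp [zsp, fillZeros]
  | cons x xs ih =>
    intro n
    cases n with
    | nil => simp [fillZeros]
    | cons m ms =>
      by_cases hx : x = 0
      · subst hx
        have h1 : zsp (0 :: xs) = 0 :: (zsp xs).map (· + 1) := by simp [zsp]
        have h2 : fillZeros (0 :: xs) (m :: ms) = m :: fillZeros xs ms := by
          simp [fillZeros]
        rw [h1, h2, List.zip_cons_cons, List.foldl_cons]
        rw [PySem.List.pySetD_of_nonneg _ _ (by omega)]
        simp only [Int.toNat_zero, List.set_cons_zero]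
        rw [List.zip_map_left]
        have hm : ((zsp xs).zip ms).map (Prod.map (· + 1) id)
            = ((zsp xs).zip ms).map (fun p => (p.1 + 1, p.2)) := by
          simp [Prod.map]
        rw [hm, fold_shift _ _ _ (fun p hp => zsp_nonneg xs p.1 (List.of_mem_zip hp).1), ih]
      · have h1 : zsp (x :: xs) = (zsp xs).map (· + 1) := by simp [zsp, hx]
        have h2 : fillZeros (x :: xs) (m :: ms) = x :: fillZeros xs (m :: ms) := by
          simp [fillZeros, hx]
        rw [h1, h2, List.zip_map_left]
        have hm : ((zsp xs).zip (m :: ms)).map (Prod.map (· + 1) id)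
            = ((zsp xs).zip (m :: ms)).map (fun p => (p.1 + 1, p.2)) := by
          simp [Prod.map]
        rw [hm, fold_shift _ _ _ (fun p hp => zsp_nonneg xs p.1 (List.of_mem_zip hp).1), ih]

-- the while-skip consumes exactly the seen prefix of the missing-label stream
theorem missS_nil (seen : List Bool) (m label : Int) (h : m < label) :
    missS seen m label = [] := by
  rw [missS, PySem.List.pyRange_one_eq_nil (by omega), List.filter_nil]

theorem missS_cons (seen : List Bool) (m label : Int) (h : label ≤ m) :
    missS seen m label =
      if seen.getD label.toNat false then missS seen m (label + 1)
      else label :: missS seen m (label + 1) := by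
  rw [missS, PySem.List.pyRange_one_cons (by omega : label < m + 1), List.filter_cons]
  cases hs : seen.getD label.toNat false <;> simp [missS]

theorem advance_miss (seen : List Bool) (m : Int) : ∀ (label : Int),
    missS seen m label =
      (if m < advanceLabel seen m label then []
       else advanceLabel seen m label :: missS seen m (advanceLabel seen m (label) + 1)) := by
  intro label
  induction label using advanceLabel.induct seen m with
  | case1 label h ih =>
    have ha : advanceLabel seen m label = advanceLabel seen m (label + 1) := by
      rw [advanceLabel, dif_pos h]
    rw [ha, missS_cons seen m label h.1, if_pos h.2]
    exact ih
  | case2 label h =>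
    have ha : advanceLabel seen m label = label := by
      rw [advanceLabel, dif_neg h]
    rw [ha]
    by_cases hm : m < label
    · rw [if_pos hm, missS_nil seen m label hm]
    · have hseen : seen.getD label.toNat false = false := by
        cases hs : seen.getD label.toNat false
        · rfl
        · exact absurd ⟨by omega, hs⟩ h
      rw [if_neg hm, missS_cons seen m label (by omega), hseen, if_neg (by simp)]

-- B's single pass equals fillZeros of the missing-label stream
theorem fillLoop_eq_fill (seen : List Bool) (m : Int) (xs : List Int) :
    ∀ (label : Int), fillLoop seen m xs label = fillZeros xs (missS seen m label) := by
  induction xs with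
  | nil =>
    intro label
    cases h : missS seen m label <;> simp [fillLoop, fillZeros]
  | cons v rest ih =>
    intro label
    by_cases hv : v = 0
    · subst hv
      rw [advance_miss seen m label]
      by_cases hm : m < advanceLabel seen m label
      · simp [fillLoop, hm, fillZeros]
      · simp [fillLoop, hm, fillZeros, ih]
    · have hz : ∀ ms, fillZeros (v :: rest) ms = v :: fillZeros rest ms := by
        intro ms; cases ms <;> simp [fillZeros, hv]
      simp [fillLoop, hv, hz, ih]

-- the bitmap marks exactly the values occurring in the list (on the label range)
theorem seen_fold_getD (m : Int) (xs : List Int) :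
    ∀ (acc : List Bool), acc.length = (m + 2).toNat →
    ∀ (i : Int), 1 ≤ i → i ≤ m →
    ((xs.foldl (fun seen v => if 0 ≤ v ∧ v ≤ m then seen.set v.toNat true else seen) acc).getD
        i.toNat false)
      = (acc.getD i.toNat false || xs.contains i) := by
  induction xs with
  | nil => intro acc _ i _ _; simp
  | cons v xs ih =>
    intro acc hlen i hi1 him
    simp only [List.foldl_cons]
    by_cases hg : 0 ≤ v ∧ v ≤ m
    · rw [if_pos hg, ih _ (by simp [hlen]) i hi1 him]
      by_cases hvi : v = i
      · subst hvi
        have hrange : v.toNat < acc.length := by rw [hlen]; omega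
        have hset : (acc.set v.toNat true).getD v.toNat false = true := by
          simp [List.getD_eq_getElem?_getD, hrange]
        rw [hset]
        simp only [List.contains_cons, BEq.rfl]
        simp
      · have hne : v.toNat ≠ i.toNat := by omega
        have hset : (acc.set v.toNat true).getD i.toNat false = acc.getD i.toNat false := by
          simp [List.getD_eq_getElem?_getD, hne]
        rw [hset]
        simp only [List.contains_cons]
        rw [show (i == v) = false from beq_eq_false_iff_ne.mpr (fun h => hvi h.symm)]
        simp
    · rw [if_neg hg, ih _ hlen i hi1 him]
      have hvi : v ≠ i := by omega
      simp only [List.contains_cons]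
      rw [show (i == v) = false from beq_eq_false_iff_ne.mpr (fun h => hvi h.symm)]
      simp

theorem buildSeen_getD (xs : List Int) (m : Int) (i : Int) (h1 : 1 ≤ i) (h2 : i ≤ m) :
    (buildSeen xs m).getD i.toNat false = xs.contains i := by
  unfold buildSeen
  rw [seen_fold_getD m xs _ (by simp) i h1 h2]
  have hrep : (List.replicate (m + 2).toNat false).getD i.toNat false = false := by
    simp only [List.getD_eq_getElem?_getD, List.getElem?_replicate]
    split <;> rfl
  simp

-- ===== VERDICT (by name: the statement is the Claim_ definition above) =====
theorem repair_empty_prediction_spec : Claim_equal_repair_empty_prediction := by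
  intro prediction parameters_number _
  unfold Spec_repair_empty_prediction repair_empty_prediction repair_empty_prediction_alt
  simp only [loop1_spec]
  rw [foldl_cons_if, List.append_nil, List.reverse_reverse]
  rw [fillLoop_eq_fill]
  have hfilter :
      (PySem.List.pyRange 1 (parameters_number + 1) 1).filter
        (fun i => !((dictOf prediction).contains i))
      = missS (buildSeen prediction parameters_number) parameters_number 1 := by
    unfold missS
    apply List.filter_congr
    intro i hi
    have hmem := (PySem.List.mem_pyRange_one).mp hi
    have h1 : (dictOf prediction).contains i = prediction.contains i := by
      unfold dictOf
      rw [contains_foldl_insert]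
      simp
    rw [h1, buildSeen_getD prediction parameters_number i (by omega) (by omega)]
  rw [hfilter, setloop_eq_zip, zipfold_eq_fill]
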